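-- pv_equiv track=rewrite | github.com/J22Pregbaha/python-tutorials | challenges/biography.py | check_name_is_ok
-- ===== SOURCE A (Python) =====
-- def check_name_is_ok(name):
--     analphabeticList = [" ", ".", ",", ":", ";", "!", "?", "'", "\"", "*"]
--     count = 0
--     for character in analphabeticList:
--         if character in name:
--             count += 1
--     if count > 0:
--         return False
--     else:
--         return True
-- ===== SOURCE B (Python) =====
-- def check_name_is_ok(name):
--     specials = {" ", ".", ",", ":", ";", "!", "?", "'", "\"", "*"}
--     return not any(c in specials for c in name)
-- ===== Notes on version B (the rewrite author's own statement) =====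
-- stated objective: idiomatic
-- what changed: B makes one pass over the characters of name testing set membership (not any(...)), instead of A's loop over the ten special characters each doing a substring scan of name and counting hits.
import Mathlib
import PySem

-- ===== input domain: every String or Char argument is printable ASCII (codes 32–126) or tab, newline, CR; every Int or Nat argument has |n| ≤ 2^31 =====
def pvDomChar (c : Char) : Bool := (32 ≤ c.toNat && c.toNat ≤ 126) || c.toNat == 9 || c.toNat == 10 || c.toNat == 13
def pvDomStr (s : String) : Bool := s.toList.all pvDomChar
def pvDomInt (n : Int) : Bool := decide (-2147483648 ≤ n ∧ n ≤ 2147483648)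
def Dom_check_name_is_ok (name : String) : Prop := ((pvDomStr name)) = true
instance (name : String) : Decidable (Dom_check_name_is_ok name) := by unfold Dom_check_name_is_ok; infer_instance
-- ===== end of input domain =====

-- B replaces A's loop over the ten special characters (each a substring scan of name) with one
-- pass over name's characters testing membership in a set of the ten specials (idiomatic).

-- ===== PORT A =====
def check_name_is_ok (name : String) : Bool :=
  let analphabeticList : List String := [" ", ".", ",", ":", ";", "!", "?", "'", "\"", "*"]
  let count : Int :=
    analphabeticList.foldl
      (fun count character => if PySem.Str.isIn character name then count + 1 else count) 0
  if count > 0 then false else true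

-- ===== PORT B =====
def pvSpecials : PySem.Set Char :=
  PySem.Set.ofList [' ', '.', ',', ':', ';', '!', '?', '\'', '"', '*']

def check_name_is_ok_alt (name : String) : Bool :=
  !(name.toList.any (fun c => PySem.Set.contains pvSpecials c))

-- ===== PRECONDITION & SPEC =====
def Spec_check_name_is_ok (name : String) (out : Bool) : Prop := out = check_name_is_ok_alt name
instance (name : String) (out : Bool) : Decidable (Spec_check_name_is_ok name out) := by unfold Spec_check_name_is_ok; infer_instance

-- ===== CLAIM (what is proved, stated in full; the proofs are below) =====
def Claim_equal_check_name_is_ok : Prop := ∀ (name : String), Dom_check_name_is_ok name → Spec_check_name_is_ok name (check_name_is_ok name)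

-- ===== LEMMAS AND PROOFS =====

-- A's counting loop computes the initial count plus the number of specials occurring in name.
lemma foldl_count (name : String) : ∀ (l : List String) (c : Int),
    l.foldl (fun count character => if PySem.Str.isIn character name then count + 1 else count) c
      = c + (l.countP (fun ch => PySem.Str.isIn ch name) : Int) := by
  intro l
  induction l with
  | nil => intro c; simp
  | cons h t ih =>
      intro c
      simp only [List.foldl_cons, List.countP_cons, ih]
      split_ifs <;> push_cast <;> ring

-- a one-character string occurs in name iff its character occurs in name
lemma str_isIn_single (s : String) (ch : Char) (hs : s.toList = [ch]) (name : String) :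
    PySem.Str.isIn s name = true ↔ ch ∈ name.toList := by
  rw [PySem.Str.isIn_iff_infix, hs, List.singleton_infix_iff]

-- ===== VERDICT (by name: the statement is the Claim_ definition above) =====
theorem check_name_is_ok_spec : Claim_equal_check_name_is_ok := by
  intro name _
  unfold Spec_check_name_is_ok check_name_is_ok check_name_is_ok_alt
  dsimp only
  rw [Bool.eq_iff_iff, foldl_count, zero_add]
  simp only [Bool.not_eq_true', List.any_eq_false,
    PySem.Set.contains_iff, pvSpecials, PySem.Set.mem_ofList]
  constructor
  · intro hA c hc hmem
    have h0 : List.countP (fun ch => PySem.Str.isIn ch name)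
        [" ", ".", ",", ":", ";", "!", "?", "'", "\"", "*"] = 0 := by
      by_contra hne
      rw [if_pos (by exact_mod_cast Nat.pos_of_ne_zero hne)] at hA
      exact Bool.false_ne_true hA
    rw [List.countP_eq_zero] at h0
    fin_cases hmem
    · exact h0 " " (by decide) ((str_isIn_single " " ' ' (by decide) name).mpr hc)
    · exact h0 "." (by decide) ((str_isIn_single "." '.' (by decide) name).mpr hc)
    · exact h0 "," (by decide) ((str_isIn_single "," ',' (by decide) name).mpr hc)
    · exact h0 ":" (by decide) ((str_isIn_single ":" ':' (by decide) name).mpr hc)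
    · exact h0 ";" (by decide) ((str_isIn_single ";" ';' (by decide) name).mpr hc)
    · exact h0 "!" (by decide) ((str_isIn_single "!" '!' (by decide) name).mpr hc)
    · exact h0 "?" (by decide) ((str_isIn_single "?" '?' (by decide) name).mpr hc)
    · exact h0 "'" (by decide) ((str_isIn_single "'" '\'' (by decide) name).mpr hc)
    · exact h0 "\"" (by decide) ((str_isIn_single "\"" '"' (by decide) name).mpr hc)
    · exact h0 "*" (by decide) ((str_isIn_single "*" '*' (by decide) name).mpr hc)
  · intro h
    have h0 : List.countP (fun ch => PySem.Str.isIn ch name)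
        [" ", ".", ",", ":", ";", "!", "?", "'", "\"", "*"] = 0 := by
      rw [List.countP_eq_zero]
      intro s hs
      fin_cases hs
      · exact fun ht => h ' ' ((str_isIn_single " " ' ' (by decide) name).mp ht) (by decide)
      · exact fun ht => h '.' ((str_isIn_single "." '.' (by decide) name).mp ht) (by decide)
      · exact fun ht => h ',' ((str_isIn_single "," ',' (by decide) name).mp ht) (by decide)
      · exact fun ht => h ':' ((str_isIn_single ":" ':' (by decide) name).mp ht) (by decide)
      · exact fun ht => h ';' ((str_isIn_single ";" ';' (by decide) name).mp ht) (by decide)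
      · exact fun ht => h '!' ((str_isIn_single "!" '!' (by decide) name).mp ht) (by decide)
      · exact fun ht => h '?' ((str_isIn_single "?" '?' (by decide) name).mp ht) (by decide)
      · exact fun ht => h '\'' ((str_isIn_single "'" '\'' (by decide) name).mp ht) (by decide)
      · exact fun ht => h '"' ((str_isIn_single "\"" '"' (by decide) name).mp ht) (by decide)
      · exact fun ht => h '*' ((str_isIn_single "*" '*' (by decide) name).mp ht) (by decide)
    rw [h0]
    simp
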